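-- pv_equiv track=rewrite | github.com/forithmus/MR-RATE | data-preprocessing/src/mr_rate_preprocessing/reports_preprocessing/06_pathology_classification/classify_pathologies_parallel.py | parse_cot
-- ===== SOURCE A (Python) =====
-- def parse_cot(raw_text, pathology_names):
--     """Parse CoT output to extract PRESENT/ABSENT labels with robust matching."""
--     labels = {}
--     lines = raw_text.split("\n")
--
--     for name in pathology_names:
--         name_lower = name.lower()
--         found = False
--
--         for line in lines:
--             line_lower = line.lower().strip()
--             if not line_lower or name_lower not in line_lower:
--                 continue
--
--             present_markers = [
--                 "→ present", "→present", "-> present", "->present",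
--                 "– present", "— present", ": present",
--             ]
--             absent_markers = [
--                 "→ absent", "→absent", "-> absent", "->absent",
--                 "– absent", "— absent", ": absent",
--                 "not mentioned", "not detected", "denied", "no evidence",
--             ]
--
--             for marker in present_markers:
--                 if marker in line_lower:
--                     labels[name] = 1
--                     found = True
--                     break
--             if found:
--                 break
--
--             for marker in absent_markers:
--                 if marker in line_lower:
--                     labels[name] = 0
--                     found = True
--                     break
--             if found:
--                 break
--
--         if name not in labels:
--             labels[name] = 0  # default absent if not found in CoT
--
--     return labels
-- ===== SOURCE B (Python) =====
-- PRESENT_MARKERS = [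
--     "\u2192 present", "\u2192present", "-> present", "->present",
--     "\u2013 present", "\u2014 present", ": present",
-- ]
-- ABSENT_MARKERS = [
--     "\u2192 absent", "\u2192absent", "-> absent", "->absent",
--     "\u2013 absent", "\u2014 absent", ": absent",
--     "not mentioned", "not detected", "denied", "no evidence",
-- ]
--
--
-- def _line_verdict(line):
--     """Lowercase-and-strip a line and classify it once: 1 if it carries a
--     present marker, 0 if an absent marker, None otherwise."""
--     s = line.lower().strip()
--     if any(m in s for m in PRESENT_MARKERS):
--         return s, 1
--     if any(m in s for m in ABSENT_MARKERS):
--         return s, 0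
--     return s, None
--
--
-- def parse_cot(raw_text, pathology_names):
--     table = [_line_verdict(line) for line in raw_text.split("\n")]
--     labels = {}
--     for name in pathology_names:
--         name_lower = name.lower()
--         labels[name] = next(
--             (v for s, v in table if v is not None and name_lower in s), 0)
--     return labels
-- ===== Notes on version B (the rewrite author's own statement) =====
-- stated objective: faster
-- what changed: B precomputes a per-line (lowercased-stripped text, present/absent/none verdict) table once and resolves each pathology name by a single first-match lookup over that table, instead of A's re-lowercasing/stripping every line and re-running the marker scans inside every name's loop; B also drops A's found-flag/late-default bookkeeping for one dict insert per name.
import Mathlib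
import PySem

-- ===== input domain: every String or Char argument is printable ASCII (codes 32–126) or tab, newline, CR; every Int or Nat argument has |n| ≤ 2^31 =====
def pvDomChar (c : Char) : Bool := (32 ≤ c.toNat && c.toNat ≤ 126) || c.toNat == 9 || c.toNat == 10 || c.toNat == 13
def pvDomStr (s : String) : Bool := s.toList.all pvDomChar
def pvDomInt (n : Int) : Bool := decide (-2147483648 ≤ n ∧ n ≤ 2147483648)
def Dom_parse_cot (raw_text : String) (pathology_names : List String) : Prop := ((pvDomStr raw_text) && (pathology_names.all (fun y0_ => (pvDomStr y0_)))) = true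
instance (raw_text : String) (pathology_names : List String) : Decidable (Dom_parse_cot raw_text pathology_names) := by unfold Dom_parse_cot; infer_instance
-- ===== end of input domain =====

-- B precomputes each line's lowercased text and present/absent verdict once and looks names up
-- in that table (measured faster than A's per-name re-scan); return values proved equal on the whole domain.

-- ===== PORT A =====
def pcPresentMarkers : List String :=
  ["→ present", "→present", "-> present", "->present", "– present", "— present", ": present"]
def pcAbsentMarkers : List String :=
  ["→ absent", "→absent", "-> absent", "->absent", "– absent", "— absent", ": absent",
   "not mentioned", "not detected", "denied", "no evidence"]

-- A's inner 'for line in lines' loop for one name: some v = the verdict recorded (found), none = loop fell through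
def pcFindA : List String → String → Option Int
  | [], _ => none
  | line :: rest, nl =>
    if PySem.Str.strip (PySem.Str.lower line) = ""
        ∨ ¬ (PySem.Str.isIn nl (PySem.Str.strip (PySem.Str.lower line)) = true) then pcFindA rest nl
    else if pcPresentMarkers.any (fun m => PySem.Str.isIn m (PySem.Str.strip (PySem.Str.lower line))) then some 1
    else if pcAbsentMarkers.any (fun m => PySem.Str.isIn m (PySem.Str.strip (PySem.Str.lower line))) then some 0
    else pcFindA rest nl

def parse_cot (raw_text : String) (pathology_names : List String) : List (String × Int) :=
  let lines := ((PySem.Str.split? raw_text "\n").getD [])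
  (pathology_names.foldl (fun labels name =>
      let nl := PySem.Str.lower name
      match pcFindA lines nl with
      | some v => labels.insert name v
      | none => if labels.contains name then labels else labels.insert name 0)
    (PySem.Dict.empty : PySem.Dict String Int)).items

-- ===== PORT B =====
-- per-line verdict table entry: (lowercased stripped line, some 1 / some 0 / none)
def pcVerdict (line : String) : String × Option Int :=
  if pcPresentMarkers.any (fun m => PySem.Str.isIn m (PySem.Str.strip (PySem.Str.lower line))) then
    (PySem.Str.strip (PySem.Str.lower line), some 1)
  else if pcAbsentMarkers.any (fun m => PySem.Str.isIn m (PySem.Str.strip (PySem.Str.lower line))) then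
    (PySem.Str.strip (PySem.Str.lower line), some 0)
  else (PySem.Str.strip (PySem.Str.lower line), none)

def parse_cot_alt (raw_text : String) (pathology_names : List String) : List (String × Int) :=
  let table := (((PySem.Str.split? raw_text "\n").getD [])).map pcVerdict
  (pathology_names.foldl (fun labels name =>
      let nl := PySem.Str.lower name
      let v : Int :=
        match table.find? (fun p => p.2.isSome && PySem.Str.isIn nl p.1) with
        | some (_, some v) => v
        | _ => 0
      labels.insert name v)
    (PySem.Dict.empty : PySem.Dict String Int)).items

-- ===== PRECONDITION & SPEC =====
def Spec_parse_cot (raw_text : String) (pathology_names : List String) (out : List (String × Int)) : Prop := out = parse_cot_alt raw_text pathology_names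
instance (raw_text : String) (pathology_names : List String) (out : List (String × Int)) : Decidable (Spec_parse_cot raw_text pathology_names out) := by unfold Spec_parse_cot; infer_instance

-- ===== CLAIM (what is proved, stated in full; the proofs are below) =====
def Claim_equal_parse_cot : Prop := ∀ (raw_text : String) (pathology_names : List String), Dom_parse_cot raw_text pathology_names → Spec_parse_cot raw_text pathology_names (parse_cot raw_text pathology_names)

-- ===== LEMMAS AND PROOFS =====

-- the per-name value both programs compute, phrased A's way
def pcValA (lines : List String) (name : String) : Int :=
  match pcFindA lines (PySem.Str.lower name) with
  | some v => v
  | none => 0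

-- B's first-qualifying-table-entry lookup equals A's inner loop
lemma find_table_eq (lines : List String) (nl : String) :
    (match (lines.map pcVerdict).find? (fun p => p.2.isSome && PySem.Str.isIn nl p.1) with
     | some (_, some v) => v
     | _ => 0) =
    (match pcFindA lines nl with | some v => v | none => 0) := by
  induction lines with
  | nil => simp [pcFindA]
  | cons line rest ih =>
    simp only [List.map_cons, List.find?_cons, pcVerdict, pcFindA]
    by_cases hp : pcPresentMarkers.any (fun m => PySem.Str.isIn m (PySem.Str.strip (PySem.Str.lower line))) = true
    · have hs : PySem.Str.strip (PySem.Str.lower line) ≠ "" := by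
        intro h; rw [h] at hp; exact absurd hp (by decide)
      rw [if_pos hp]
      by_cases hin : PySem.Str.isIn nl (PySem.Str.strip (PySem.Str.lower line)) = true
      · rw [if_neg (show ¬(PySem.Str.strip (PySem.Str.lower line) = ""
            ∨ ¬(PySem.Str.isIn nl (PySem.Str.strip (PySem.Str.lower line)) = true)) from
            fun h => h.elim hs (fun h2 => h2 hin)), if_pos hp]
        simp only [Option.isSome_some, Bool.true_and, hin]
      · rw [if_pos (Or.inr hin)]
        have hin0 : PySem.Str.isIn nl (PySem.Str.strip (PySem.Str.lower line)) = false :=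
          Bool.eq_false_iff.mpr hin
        simp only [Option.isSome_some, Bool.true_and, hin0]
        exact ih
    · rw [if_neg hp]
      by_cases ha : pcAbsentMarkers.any (fun m => PySem.Str.isIn m (PySem.Str.strip (PySem.Str.lower line))) = true
      · have hs : PySem.Str.strip (PySem.Str.lower line) ≠ "" := by
          intro h; rw [h] at ha; exact absurd ha (by decide)
        rw [if_pos ha]
        by_cases hin : PySem.Str.isIn nl (PySem.Str.strip (PySem.Str.lower line)) = true
        · rw [if_neg (show ¬(PySem.Str.strip (PySem.Str.lower line) = ""
              ∨ ¬(PySem.Str.isIn nl (PySem.Str.strip (PySem.Str.lower line)) = true)) from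
              fun h => h.elim hs (fun h2 => h2 hin)), if_neg hp, if_pos ha]
          simp only [Option.isSome_some, Bool.true_and, hin]
        · rw [if_pos (Or.inr hin)]
          have hin0 : PySem.Str.isIn nl (PySem.Str.strip (PySem.Str.lower line)) = false :=
            Bool.eq_false_iff.mpr hin
          simp only [Option.isSome_some, Bool.true_and, hin0]
          exact ih
      · rw [if_neg ha]
        simp only [Option.isSome_none, Bool.false_and]
        by_cases hs' : PySem.Str.strip (PySem.Str.lower line) = ""
        · rw [if_pos (Or.inl hs')]
          exact ih
        · by_cases hin : PySem.Str.isIn nl (PySem.Str.strip (PySem.Str.lower line)) = true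
          · rw [if_neg (show ¬(PySem.Str.strip (PySem.Str.lower line) = ""
                ∨ ¬(PySem.Str.isIn nl (PySem.Str.strip (PySem.Str.lower line)) = true)) from
                fun h => h.elim hs' (fun h2 => h2 hin)), if_neg hp, if_neg ha]
            exact ih
          · rw [if_pos (Or.inr hin)]
            exact ih

-- re-inserting a value a dict already holds at a key changes nothing
lemma insert_of_get?_eq (d : PySem.Dict String Int) (k : String) (v : Int)
    (hnd : d.keys.Nodup) (h : d.get? k = some v) : d.insert k v = d := by
  apply PySem.Dict.ext
  have hc : d.contains k = true := by
    rw [PySem.Dict.contains_eq_isSome_get?, h]; rfl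
  rw [PySem.Dict.items_insert_of_contains d v hc]
  have hmap : ∀ p ∈ d.items, (if (p.1 == k) = true then (k, v) else p) = p := by
    intro p hp
    obtain ⟨a, b⟩ := p
    by_cases hk : (a == k) = true
    · have hk' : a = k := by simpa using hk
      have hg : d.get? a = some b := PySem.Dict.get?_of_mem_items d hp hnd
      rw [hk', h] at hg
      rw [if_pos hk]
      exact Prod.ext_iff.mpr ⟨hk'.symm, Option.some.inj hg⟩
    · rw [if_neg hk]
  rw [List.map_congr_left hmap]
  exact List.map_id' d.items

-- A's fold is the plain 'insert the per-name value' fold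
lemma foldA_eq (lines : List String) (names : List String) (d : PySem.Dict String Int)
    (hnd : d.keys.Nodup) (hinv : ∀ k v, d.get? k = some v → v = pcValA lines k) :
    names.foldl (fun labels name =>
      match pcFindA lines (PySem.Str.lower name) with
      | some v => labels.insert name v
      | none => if labels.contains name then labels else labels.insert name 0) d =
    names.foldl (fun labels name => labels.insert name (pcValA lines name)) d := by
  induction names generalizing d with
  | nil => rfl
  | cons name rest ih =>
    simp only [List.foldl_cons]
    have hstep : (match pcFindA lines (PySem.Str.lower name) with
        | some v => d.insert name v
        | none => if d.contains name then d else d.insert name 0) =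
        d.insert name (pcValA lines name) := by
      unfold pcValA
      cases hf : pcFindA lines (PySem.Str.lower name) with
      | some v => rfl
      | none =>
        simp only
        by_cases hc : d.contains name = true
        · rw [if_pos hc]
          have : (d.get? name).isSome := by
            rw [← PySem.Dict.contains_eq_isSome_get?, hc]
          obtain ⟨v, hv⟩ := Option.isSome_iff_exists.mp this
          have hv0 : v = 0 := by
            have := hinv name v hv
            unfold pcValA at this
            rw [hf] at this
            exact this
          rw [hv0] at hv
          exact (insert_of_get?_eq d name 0 hnd hv).symm
        · rw [if_neg hc]
    rw [hstep]
    apply ih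
    · exact PySem.Dict.nodup_keys_insert d name _ hnd
    · intro k v hk
      by_cases hkn : k = name
      · subst hkn
        rw [PySem.Dict.get?_insert_self] at hk
        exact (Option.some.inj hk).symm
      · rw [PySem.Dict.get?_insert_of_ne _ _ hkn] at hk
        exact hinv k v hk

-- ===== VERDICT (by name: the statement is the Claim_ definition above) =====
theorem parse_cot_spec : Claim_equal_parse_cot := by
  intro raw_text pathology_names _
  unfold Spec_parse_cot parse_cot parse_cot_alt
  simp only
  rw [foldA_eq (((PySem.Str.split? raw_text "\n").getD [])) pathology_names PySem.Dict.empty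
      (by simp) (by intro k v h; simp [PySem.Dict.get?_empty] at h)]
  congr 1
  apply PySem.List.foldl_congr_mem
  intro acc name _
  congr 1
  rw [find_table_eq]
  rfl
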